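-- pv_equiv track=rewrite | github.com/Alaine12/lista_atividades_05 | l5q6.py | converter_hora
-- ===== SOURCE A (Python) =====
-- def converter_hora(hora):
-- 	if hora > 12 and hora != 24:
-- 		contador = 0
-- 		for x in range(hora):
-- 			if x >= 12:
-- 				contador+=1
-- 		return contador
-- 	elif hora == 24:
-- 		return 0
-- 	else:
-- 		return hora
-- ===== SOURCE B (Python) =====
-- def converter_hora(hora):
-- 	if hora == 24:
-- 		return 0
-- 	if hora > 12:
-- 		return hora - 12
-- 	return hora
-- ===== Notes on version B (the rewrite author's own statement) =====
-- stated objective: faster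
-- what changed: Replaced the O(n) counting loop over range(hora) with the closed form hora - 12.
import Mathlib
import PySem

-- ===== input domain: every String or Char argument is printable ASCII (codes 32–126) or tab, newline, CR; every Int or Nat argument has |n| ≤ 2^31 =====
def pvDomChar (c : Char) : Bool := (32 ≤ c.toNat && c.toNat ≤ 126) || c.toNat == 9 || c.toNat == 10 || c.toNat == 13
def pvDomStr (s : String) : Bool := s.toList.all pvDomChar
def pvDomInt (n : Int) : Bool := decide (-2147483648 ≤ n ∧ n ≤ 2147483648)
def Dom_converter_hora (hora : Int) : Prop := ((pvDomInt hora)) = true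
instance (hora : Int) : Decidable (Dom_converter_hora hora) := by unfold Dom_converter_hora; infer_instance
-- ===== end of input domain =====

-- B replaces A's O(n) counting loop over range(hora) by the closed form hora - 12 (faster, asymptotic).


-- ===== PORT A =====
def converter_hora (hora : Int) : Int :=
  if hora > 12 ∧ hora ≠ 24 then
    (PySem.List.pyRange 0 hora 1).foldl
      (fun contador x => if x ≥ 12 then contador + 1 else contador) 0
  else if hora = 24 then 0
  else hora

-- ===== PORT B =====
def converter_hora_alt (hora : Int) : Int :=
  if hora = 24 then 0
  else if hora > 12 then hora - 12
  else hora

-- ===== PRECONDITION & SPEC =====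
def Spec_converter_hora (hora : Int) (out : Int) : Prop := out = converter_hora_alt hora
instance (hora : Int) (out : Int) : Decidable (Spec_converter_hora hora out) := by unfold Spec_converter_hora; infer_instance

-- ===== CLAIM (what is proved, stated in full; the proofs are below) =====
def Claim_equal_converter_hora : Prop := ∀ (hora : Int), Dom_converter_hora hora → Spec_converter_hora hora (converter_hora hora)

-- ===== LEMMAS AND PROOFS =====

theorem count_ge12_from (n : Nat) : ∀ (a b c : Int), 12 ≤ a → (b - a).toNat = n →
    (PySem.List.pyRange a b).foldl
      (fun contador x => if x ≥ 12 then contador + 1 else contador) c = c + n := by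
  induction n with
  | zero =>
      intro a b c _ h
      rw [PySem.List.pyRange_one_eq_nil (by omega)]
      simp
  | succ m ih =>
      intro a b c h12 h
      rw [PySem.List.pyRange_one_cons (by omega)]
      simp only [List.foldl_cons, if_pos (show (12:Int) ≤ a from h12)]
      rw [ih (a + 1) b (c + 1) (by omega) (by omega)]
      push_cast
      omega

theorem count_ge12_low (c : Int) :
    (PySem.List.pyRange 0 12).foldl
      (fun contador x => if x ≥ 12 then contador + 1 else contador) c = c := by
  rw [PySem.List.pyRange_one]
  norm_num [show Int.toNat 12 = 12 from rfl, List.range_succ]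

-- ===== VERDICT (by name: the statement is the Claim_ definition above) =====
theorem converter_hora_spec : Claim_equal_converter_hora := by
  intro hora _
  unfold Spec_converter_hora converter_hora converter_hora_alt
  by_cases h24 : hora = 24
  · subst h24; decide
  · by_cases h12 : hora > 12
    · rw [if_pos ⟨h12, h24⟩,
        PySem.List.pyRange_one_append 0 12 hora (by norm_num) (by omega),
        List.foldl_append, count_ge12_low,
        count_ge12_from (hora - 12).toNat 12 hora 0 (le_refl 12) rfl,
        if_neg h24, if_pos h12]
      omega
    · rw [if_neg (by tauto)]
      simp only [if_neg h24, if_neg h12]
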